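-- pv_equiv track=rewrite | github.com/minari1505/Algorithm | Hashing/신고결과받기2.py | solution
-- ===== SOURCE A (Python) =====
-- import collections
--
-- def solution(id_list, report, k):
--     answer = []  # 신고한 유저가 이메일을 받을 횟수 저장
--
--     re_dic = collections.defaultdict(list)  # 신고한 유저 - 신고당한 유저
--     ed_dic = collections.defaultdict(int)  # 신고당한 유저 - 신고당한 횟수
--
--     # 1. 중복 제거
--     report = list(set(report))
--
--     # 2. 신고한유저->신고당한유저, 신고당한유저->횟수 저장
--     for i in report:
--         rep, ed = i.split()  # rep : 신고한 유저, ed: 신고당한 유저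
--         re_dic[rep].append(ed)  # re_dic에 신고한 유저 -> 신고당한유저 넣기
--         ed_dic[ed] += 1
--
--         # 3.re_dic value에 k번 넘은 사람이 있다면, cnt += 1
--     for i in id_list:
--         cnt = 0
--         for j in re_dic[i]:
--             if ed_dic[j] >= k:  # 신고당한 유저의 신고당한 횟수가 k번보다 같거나 크다면
--                 cnt += 1
--
--         answer.append(cnt)
--
--     return answer
-- ===== SOURCE B (Python) =====
-- def solution(id_list, report, k):
--     # one flat pass over deduplicated reports: build an ed->count dict, take the
--     # "banned" set (reported >= k times), then count banned hits per reporter.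
--     pairs = [r.split() for r in dict.fromkeys(report)]
--     cnt = {}
--     for rep, ed in pairs:
--         cnt[ed] = cnt.get(ed, 0) + 1
--     banned = {e for e, c in cnt.items() if c >= k}
--     mails = {}
--     for rep, ed in pairs:
--         if ed in banned:
--             mails[rep] = mails.get(rep, 0) + 1
--     return [mails.get(i, 0) for i in id_list]
-- ===== Notes on version B (the rewrite author's own statement) =====
-- stated objective: alternative
-- what changed: Replaces A's reporter->victim-list dict plus nested per-user scan with a banned set of users reported >= k times and one flat filtered sweep filling a reporter-keyed counter, then a lookup per id.
-- outside the precondition, e.g. on solution(['a'], ['a'], 1): A raises ValueError, B raises ValueError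
import Mathlib
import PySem

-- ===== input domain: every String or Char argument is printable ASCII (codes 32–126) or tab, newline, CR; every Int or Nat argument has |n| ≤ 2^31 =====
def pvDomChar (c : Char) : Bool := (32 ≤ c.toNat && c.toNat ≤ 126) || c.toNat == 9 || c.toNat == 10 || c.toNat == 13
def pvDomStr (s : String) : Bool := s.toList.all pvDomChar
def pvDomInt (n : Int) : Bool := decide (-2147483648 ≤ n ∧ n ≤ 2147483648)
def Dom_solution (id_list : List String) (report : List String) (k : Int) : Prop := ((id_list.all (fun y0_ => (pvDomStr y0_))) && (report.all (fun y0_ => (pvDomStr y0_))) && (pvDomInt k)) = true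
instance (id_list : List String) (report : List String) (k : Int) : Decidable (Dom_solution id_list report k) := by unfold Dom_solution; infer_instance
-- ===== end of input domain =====

-- B replaces A's reporter->victims list mapping and nested per-user scan by a banned set
-- plus one flat filtered sweep filling a reporter-keyed counter (objective: alternative).

-- ===== PORT A =====
def solution (id_list : List String) (report : List String) (k : Int) : List Int :=
  let report' := PySem.Set.ofList report  -- report = list(set(report))
  let dicts := report'.foldl
    (fun (st : PySem.Dict String (List String) × PySem.Dict String Int) i =>
      match PySem.Str.split₀ i with
      | [rep, ed] => (st.1.modify rep [] (fun v => v ++ [ed]), st.2.modify ed 0 (fun c => c + 1))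
      | _ => st)  -- here Python's 'rep, ed = i.split()' raises ValueError; excluded by Pre_solution
    (PySem.Dict.empty, PySem.Dict.empty)
  id_list.foldl
    (fun answer i =>
      answer ++ [(dicts.1.getD i []).foldl
        (fun cnt j => if dicts.2.getD j 0 ≥ k then cnt + 1 else cnt) 0])
    []

-- ===== PORT B =====
def pairOf (r : String) : Option (String × String) :=
  let t := PySem.Str.split₀ r
  -- 'rep, ed' destructuring raises ValueError in Python unless exactly 2 tokens; excluded by Pre_solution
  if h : t.length = 2 then some (t[0], t[1]) else none

def solution_alt (id_list : List String) (report : List String) (k : Int) : List Int :=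
  let pairs := (PySem.List.dedup report).filterMap pairOf
  let cnt := pairs.foldl (fun d p => d.insert p.2 (d.getD p.2 0 + 1)) PySem.Dict.empty
  let banned := PySem.Set.ofList ((cnt.items.filter (fun e => e.2 ≥ k)).map (fun e => e.1))
  let mails := pairs.foldl
    (fun d p => if PySem.Set.contains banned p.2 then d.insert p.1 (d.getD p.1 0 + 1) else d)
    PySem.Dict.empty
  id_list.map (fun i => mails.getD i 0)

-- ===== PRECONDITION & SPEC =====
-- Pre_ excludes reports that do not split into exactly two whitespace-separated tokens,
-- on which Python A (and B) raise ValueError at 'rep, ed = i.split()'.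
def Pre_solution (id_list : List String) (report : List String) (k : Int) : Prop :=
  ∀ r ∈ report, (PySem.Str.split₀ r).length = 2
instance (id_list : List String) (report : List String) (k : Int) : Decidable (Pre_solution id_list report k) := by unfold Pre_solution; infer_instance
def pvWitness_solution : List String × List String × Int := (["muzi", "frodo"], ["muzi frodo", "frodo muzi", "muzi frodo"], 1)

def Spec_solution (id_list : List String) (report : List String) (k : Int) (out : List Int) : Prop := out = solution_alt id_list report k
instance (id_list : List String) (report : List String) (k : Int) (out : List Int) : Decidable (Spec_solution id_list report k out) := by unfold Spec_solution; infer_instance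

-- ===== CLAIM (what is proved, stated in full; the proofs are below) =====
def Claim_equal_solution : Prop := ∀ (id_list : List String) (report : List String) (k : Int), Dom_solution id_list report k → Pre_solution id_list report k → Spec_solution id_list report k (solution id_list report k)

-- ===== LEMMAS AND PROOFS =====

-- A's combined loop over the deduplicated reports splits into the two per-dict folds over the parsed pairs.
theorem fold_pair_split (l : List String)
    (h : ∀ r ∈ l, (PySem.Str.split₀ r).length = 2)
    (d1 : PySem.Dict String (List String)) (d2 : PySem.Dict String Int) :
    l.foldl
      (fun (st : PySem.Dict String (List String) × PySem.Dict String Int) i =>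
        match PySem.Str.split₀ i with
        | [rep, ed] => (st.1.modify rep [] (fun v => v ++ [ed]), st.2.modify ed 0 (fun c => c + 1))
        | _ => st) (d1, d2)
    = ((l.filterMap pairOf).foldl (fun d p => d.modify p.1 [] (fun v => v ++ [p.2])) d1,
       (l.filterMap pairOf).foldl (fun d p => d.modify p.2 0 (fun c => c + 1)) d2) := by
  induction l generalizing d1 d2 with
  | nil => simp
  | cons r l ih =>
    have hr := h r (by simp)
    obtain ⟨a, b, hab⟩ : ∃ a b, PySem.Str.split₀ r = [a, b] := by
      cases hsp : PySem.Str.split₀ r with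
      | nil => simp [hsp] at hr
      | cons x t =>
        cases t with
        | nil => simp [hsp] at hr
        | cons y t' =>
          cases t' with
          | nil => exact ⟨x, y, rfl⟩
          | cons z t'' => simp [hsp] at hr
    have hpair : pairOf r = some (a, b) := by simp [pairOf, hab]
    simp only [List.foldl_cons, List.filterMap_cons, hpair, hab]
    exact ih (fun r hr => h r (by simp [hr])) _ _

-- B's first loop is Counter over the victims of the pairs.
theorem cnt_pairs (l : List (String × String)) :
    l.foldl (fun d p => d.insert p.2 (d.getD p.2 0 + 1)) PySem.Dict.empty
      = PySem.Dict.counter (l.map (fun p => p.2)) := by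
  rw [← PySem.Dict.foldl_insert_getD_add_one_eq_counter]
  exact (List.foldl_map (f := fun p : String × String => p.2)
    (g := fun (d : PySem.Dict String Int) x => d.insert x (d.getD x 0 + 1))).symm

-- A's victim-count dict, evaluated at any key.
theorem ed_getD (l : List (String × String)) (j : String) :
    (l.foldl (fun d p => d.modify p.2 0 (fun c => c + 1))
        (PySem.Dict.empty : PySem.Dict String Int)).getD j 0
      = ((l.map (fun p => p.2)).count j : Int) := by
  rw [show l.foldl (fun d p => d.modify p.2 0 (fun c => c + 1))
        (PySem.Dict.empty : PySem.Dict String Int)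
      = (l.map (fun p => p.2)).foldl (fun d x => d.modify x 0 (fun c => c + 1)) PySem.Dict.empty
    from (List.foldl_map (f := fun p : String × String => p.2)
      (g := fun (d : PySem.Dict String Int) x => d.modify x 0 (fun c => c + 1))).symm]
  rw [PySem.Dict.getD_foldl_modify_add_one]
  simp

-- A's counting loop over re_dic[i].
theorem count_fold (ed_dic : PySem.Dict String Int) (k : Int) (l : List String) (a : Int) :
    l.foldl (fun cnt j => if ed_dic.getD j 0 ≥ k then cnt + 1 else cnt) a
      = a + (l.countP (fun j => decide (ed_dic.getD j 0 ≥ k)) : Int) := by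
  induction l generalizing a with
  | nil => simp
  | cons x l ih => by_cases h : ed_dic.getD x 0 ≥ k <;> simp [h, ih] <;> push_cast <;> ring

-- B's second loop: value of the reporter-keyed counter.
theorem mails_getD (s : PySem.Set String) (i : String) (l : List (String × String))
    (d : PySem.Dict String Int) :
    (l.foldl (fun d p =>
        if PySem.Set.contains s p.2 then d.insert p.1 (d.getD p.1 0 + 1) else d) d).getD i 0
      = d.getD i 0 + (l.countP (fun p => PySem.Set.contains s p.2 && (p.1 == i)) : Int) := by
  induction l generalizing d with
  | nil => simp
  | cons p l ih =>
    simp only [List.foldl_cons, List.countP_cons]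
    cases hC : PySem.Set.contains s p.2 with
    | false =>
      rw [if_neg (by simp [hC]), ih]
      simp [hC]
    | true =>
      rw [if_pos (by simp [hC]), ih]
      by_cases hi : p.1 = i
      · simp [PySem.Dict.getD_insert, hi, hC]; push_cast; ring
      · have hne : (p.1 == i) = false := by simp [hi]
        simp [PySem.Dict.getD_insert, hC, hne, Ne.symm hi]

-- membership in B's banned set, for victims that actually occur
theorem banned_contains (eds : List String) (k : Int) (j : String) (hj : j ∈ eds) :
    PySem.Set.contains (PySem.Set.ofList
        ((((PySem.Dict.counter eds).items).filter (fun e => e.2 ≥ k)).map (fun e => e.1))) j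
      = decide ((eds.count j : Int) ≥ k) := by
  rw [show ∀ (s : PySem.Set String) (x : String),
        PySem.Set.contains s x = decide (x ∈ s) from fun s x => by simp [PySem.Set.contains]]
  rw [decide_eq_decide, PySem.Dict.items_counter]
  constructor
  · intro hmem
    rw [PySem.Set.mem_ofList] at hmem
    obtain ⟨p, hp, hpj⟩ := List.mem_map.mp hmem
    obtain ⟨hpm, hq⟩ := List.mem_filter.mp hp
    obtain ⟨e, he, hge⟩ := List.mem_map.mp hpm
    subst hge; subst hpj; simpa using hq
  · intro hk
    rw [PySem.Set.mem_ofList]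
    exact List.mem_map.mpr ⟨(j, (eds.count j : Int)),
      List.mem_filter.mpr ⟨List.mem_map.mpr ⟨j, (PySem.Set.mem_ofList eds j).mpr hj, rfl⟩,
        by simpa using hk⟩, rfl⟩

-- the per-user counts of the two programs agree, over any list of parsed pairs
theorem core_count (pairs : List (String × String)) (k : Int) (i : String) :
    ((pairs.foldl (fun d p => d.modify p.1 [] (fun v => v ++ [p.2]))
        (PySem.Dict.empty : PySem.Dict String (List String))).getD i []).foldl
      (fun cnt j =>
        if (pairs.foldl (fun d p => d.modify p.2 0 (fun c => c + 1))
            (PySem.Dict.empty : PySem.Dict String Int)).getD j 0 ≥ k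
        then cnt + 1 else cnt) 0
    = (pairs.foldl (fun d p =>
        if PySem.Set.contains (PySem.Set.ofList
            ((((PySem.Dict.counter (pairs.map (fun p => p.2))).items).filter
              (fun e => e.2 ≥ k)).map (fun e => e.1))) p.2
        then d.insert p.1 (d.getD p.1 0 + 1) else d)
        (PySem.Dict.empty : PySem.Dict String Int)).getD i 0 := by
  rw [PySem.Dict.getD_foldl_modify_append]
  simp only [PySem.Dict.getD_empty, List.nil_append]
  rw [count_fold, mails_getD]
  simp only [PySem.Dict.getD_empty, zero_add, ed_getD]
  congr 1
  rw [List.countP_map, List.countP_filter]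
  apply List.countP_congr
  intro p hp
  simp only [Function.comp]
  rw [banned_contains (pairs.map (fun p => p.2)) k p.2 (List.mem_map_of_mem hp)]

theorem solution_spec : Claim_equal_solution := by
  intro id_list report k _hdom hpre
  unfold Spec_solution solution solution_alt
  simp only [PySem.List.dedup_eq_ofList]
  have hall : ∀ r ∈ PySem.Set.ofList report, (PySem.Str.split₀ r).length = 2 :=
    fun r hr => hpre r ((PySem.Set.mem_ofList report r).1 hr)
  rw [fold_pair_split _ hall]
  simp only [cnt_pairs]
  rw [PySem.List.foldl_append_singleton_eq_map]
  apply List.map_congr_left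
  intro i _
  exact core_count ((PySem.Set.ofList report).filterMap pairOf) k i
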